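-- pv_equiv track=rewrite | github.com/kmonguu/Algorithm | Python/Programmers/KAKAO/Level1/신고 결과 받기.py | solution
-- ===== SOURCE A (Python) =====
-- from collections import defaultdict
--
-- def solution(id_list, report, k):
--     answer = []
--     reports = list(set(report))
--     user = defaultdict(set)
--     report_count = defaultdict(int)
--
--
--     for report in reports:
--         reporter, target = report.split()
--
--         user[reporter].add(target)          # 신고자가 신고한 대상을 저장 : defaultdict(<class 'set'>, {'muzi': {'frodo', 'neo'}, 'frodo': {'neo'}, 'apeach': {'frodo', 'muzi'}})
--         report_count[target] += 1           # 신고 당한 대상의 신고 받은 횟수 저장 : defaultdict(<class 'int'>, {'frodo': 2, 'neo': 2, 'muzi': 1})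
--
--
--     for id in id_list:
--         result = 0
--
--         for u in user[id]:
--             if report_count[u] >= k:        # 신고 대상의 신고 받은 횟수가 k번이 넘는다면
--                 result += 1                 # 신고자가 받을 메일 횟수를 증가시킴
--
--         answer.append(result)
--     return answer
-- ===== SOURCE B (Python) =====
-- def solution(id_list, report, k):
--     # Brute-force counting over plain lists: no dicts, no sets. Dedup the report
--     # strings by first occurrence, parse them, dedup the (reporter, target)
--     # pairs likewise, then answer each id by scanning the deduped pairs and
--     # testing the threshold inline with tgts.count(t).
--     rs = []
--     for r in report:
--         if r not in rs:
--             rs.append(r)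
--     pairs = [tuple(r.split()) for r in rs]
--     tgts = [t for _, t in pairs]
--     dp = []
--     for p in pairs:
--         if p not in dp:
--             dp.append(p)
--     return [sum(1 for rep, t in dp if rep == i and tgts.count(t) >= k)
--             for i in id_list]
-- ===== Notes on version B (the rewrite author's own statement) =====
-- stated objective: alternative
-- what changed: B drops A's defaultdict(set)/defaultdict(int) hash aggregation entirely: it dedups the report strings and the parsed (reporter,target) pairs by first-occurrence list membership and answers each id by a direct scan of the deduped pairs, testing the k-threshold inline with tgts.count(t) instead of a precomputed per-target counter; it trades A's hash maps for brute-force list scans (quadratic, no auxiliary mappings).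
import Mathlib
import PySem

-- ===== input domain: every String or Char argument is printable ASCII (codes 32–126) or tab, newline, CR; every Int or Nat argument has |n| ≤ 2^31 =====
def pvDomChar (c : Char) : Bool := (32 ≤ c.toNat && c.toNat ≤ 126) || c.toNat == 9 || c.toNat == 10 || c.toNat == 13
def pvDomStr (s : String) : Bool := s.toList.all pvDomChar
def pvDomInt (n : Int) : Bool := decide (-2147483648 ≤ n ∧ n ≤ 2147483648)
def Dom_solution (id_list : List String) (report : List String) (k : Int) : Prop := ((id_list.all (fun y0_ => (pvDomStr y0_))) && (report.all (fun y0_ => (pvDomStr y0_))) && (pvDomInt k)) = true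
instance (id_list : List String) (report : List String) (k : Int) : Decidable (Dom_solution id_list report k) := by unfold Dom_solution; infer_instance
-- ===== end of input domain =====

-- B drops A's dict/set aggregation entirely: it dedups the report strings and the
-- parsed pairs by first occurrence over plain lists and answers each id by a direct
-- scan of the deduped pairs with the threshold tested inline via tgts.count (alternative).

-- parse a report string into (reporter, target); none = the ValueError case
-- (tuple unpacking of a string that is not exactly two words), excluded by Pre_.
def parse? (r : String) : Option (String × String) :=
  match PySem.Str.split₀ r with
  | [a, b] => some (a, b)
  | _ => none

-- ===== PORT A =====
-- one iteration of A's first loop; a report that does not split into exactly two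
-- words makes Python's unpacking raise ValueError (excluded by Pre_solution): the
-- state is left unchanged there.
def stepA (st : PySem.Dict String (PySem.Set String) × PySem.Dict String Int) (r : String) :
    PySem.Dict String (PySem.Set String) × PySem.Dict String Int :=
  match PySem.Str.split₀ r with
  | [reporter, target] =>
      (st.1.modify reporter PySem.Set.empty (fun s => s.add target),
       st.2.modify target 0 (fun c => c + 1))
  | _ => st

def solution (id_list : List String) (report : List String) (k : Int) : List Int :=
  let reports := PySem.Set.ofList report
  let st := reports.foldl stepA (PySem.Dict.empty, PySem.Dict.empty)
  id_list.foldl (fun answer id =>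
    answer ++ [(st.1.getD id PySem.Set.empty).foldl
      (fun result u => if k ≤ st.2.getD u 0 then result + 1 else result) 0]) []

-- ===== PORT B =====
def solution_alt (id_list : List String) (report : List String) (k : Int) : List Int :=
  let rs := report.foldl
    (fun (acc : List String) r => if acc.contains r then acc else acc ++ [r]) []
  -- [tuple(r.split()) for r in rs]: unpacking raises ValueError on a report that is
  -- not two words (outside Pre_solution); parse? drops such strings.
  let pairs := rs.filterMap parse?
  let tgts := pairs.map Prod.snd
  let dp := pairs.foldl
    (fun (acc : List (String × String)) p => if acc.contains p then acc else acc ++ [p]) []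
  id_list.map (fun i =>
    dp.foldl (fun (s : Int) p =>
      if p.1 == i && decide (k ≤ (tgts.count p.2 : Int)) then s + 1 else s) 0)

-- ===== PRECONDITION & SPEC =====
-- Pre_ excludes exactly the inputs where a report string does not consist of two
-- whitespace-separated words: there Python A's tuple unpacking raises ValueError.
def Pre_solution (id_list : List String) (report : List String) (k : Int) : Prop :=
  ∀ r ∈ report, (PySem.Str.split₀ r).length = 2
instance (id_list : List String) (report : List String) (k : Int) : Decidable (Pre_solution id_list report k) := by unfold Pre_solution; infer_instance

def pvWitness_solution : List String × List String × Int :=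
  (["muzi", "frodo", "apeach", "neo"],
   ["muzi frodo", "apeach frodo", "frodo neo", "muzi neo", "apeach muzi"], 2)

def Spec_solution (id_list : List String) (report : List String) (k : Int) (out : List Int) : Prop := out = solution_alt id_list report k
instance (id_list : List String) (report : List String) (k : Int) (out : List Int) : Decidable (Spec_solution id_list report k out) := by unfold Spec_solution; infer_instance

-- ===== CLAIM (what is proved, stated in full; the proofs are below) =====
def Claim_equal_solution : Prop := ∀ (id_list : List String) (report : List String) (k : Int), Dom_solution id_list report k → Pre_solution id_list report k → Spec_solution id_list report k (solution id_list report k)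

-- ===== LEMMAS AND PROOFS =====

theorem foldl_stepA (l : List String)
    (st : PySem.Dict String (PySem.Set String) × PySem.Dict String Int) :
    l.foldl stepA st
      = (l.filterMap parse?).foldl
          (fun st p => (st.1.modify p.1 PySem.Set.empty (fun s => s.add p.2),
                        st.2.modify p.2 0 (fun c => c + 1))) st := by
  induction l generalizing st with
  | nil => rfl
  | cons r l ih =>
      rw [List.foldl_cons, List.filterMap_cons]
      have h : stepA st r = match parse? r with
        | some p => (st.1.modify p.1 PySem.Set.empty (fun s => s.add p.2),
                     st.2.modify p.2 0 (fun c => c + 1))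
        | none => st := by
        unfold stepA parse?
        rcases hs : PySem.Str.split₀ r with _ | ⟨a, _ | ⟨b, _ | _⟩⟩ <;> rfl
      rw [h]
      cases hp : parse? r <;> simp only [List.foldl_cons] <;> rw [ih]

-- first-occurrence dedup by list membership is PySem.Set.ofList
theorem foldl_dedup_eq_ofList {α : Type} [BEq α] (l : List α) :
    l.foldl (fun (acc : List α) x => if acc.contains x then acc else acc ++ [x]) []
      = PySem.Set.ofList l := rfl

-- the distinct targets reported by `id`, in first-occurrence order
def targets (id : String) (L : List (String × String)) : List String :=
  (L.filter (fun p => p.1 == id)).map Prod.snd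

-- A's user[id] set is exactly the dedup of id's targets
theorem userA_getD (id : String) (L : List (String × String))
    (d : PySem.Dict String (PySem.Set String)) :
    (L.foldl (fun d p => d.modify p.1 PySem.Set.empty (fun s => s.add p.2)) d).getD id
        PySem.Set.empty
      = List.foldl PySem.Set.add (d.getD id PySem.Set.empty) (targets id L) := by
  induction L generalizing d with
  | nil => rfl
  | cons p L ih =>
      rw [List.foldl_cons, ih]
      by_cases h : p.1 = id
      · subst h
        simp [targets, PySem.Dict.modify, PySem.Dict.getD_insert_self]
      · have h' : id ≠ p.1 := fun hh => h hh.symm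
        simp [targets, PySem.Dict.modify,
          PySem.Dict.getD_insert_of_ne _ _ _ h', h]

-- counting over the deduped target list of `id` = counting over the deduped pair list
theorem countP_dedup_fiber (L : List (String × String)) (id : String) (q : String → Bool) :
    List.countP q (PySem.Set.ofList (targets id L))
      = List.countP (fun p => (p.1 == id) && q p.2) (PySem.Set.ofList L) := by
  have hcard : ∀ {α : Type} [DecidableEq α] (l : List α) (p : α → Bool), l.Nodup →
      List.countP p l = ({x ∈ l.toFinset | p x = true}).card := by
    intro α _ l p hnd
    rw [List.countP_eq_length_filter, ← List.toFinset_filter,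
      List.toFinset_card_of_nodup (hnd.filter p)]
  rw [hcard _ _ (PySem.Set.nodup_ofList _), hcard _ _ (PySem.Set.nodup_ofList _)]
  have hT : (PySem.Set.ofList (targets id L)).toFinset = (targets id L).toFinset := by
    ext t; simp [PySem.Set.mem_ofList]
  have hL : (PySem.Set.ofList L).toFinset = L.toFinset := by
    ext p; simp [PySem.Set.mem_ofList]
  rw [hT, hL]
  have himg : {p ∈ L.toFinset | ((p.1 == id) && q p.2) = true}
      = Finset.image (fun t => (id, t)) {t ∈ (targets id L).toFinset | q t = true} := by
    ext p
    simp only [Finset.mem_filter, Finset.mem_image, List.mem_toFinset, targets,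
      List.mem_map, List.mem_filter, Bool.and_eq_true, beq_iff_eq]
    constructor
    · rintro ⟨hp, hid, hq⟩
      exact ⟨p.2, ⟨⟨p, ⟨hp, hid⟩, rfl⟩, hq⟩, by rw [← hid]⟩
    · rintro ⟨t, ⟨⟨p', ⟨hp', hid'⟩, ht⟩, hq⟩, hpt⟩
      subst ht; subst hpt
      have : p' = (id, p'.2) := by
        ext <;> simp [hid']
      rw [← this]
      exact ⟨hp', hid', hq⟩
  rw [himg, Finset.card_image_of_injective _ (fun a b h => (Prod.mk.injEq _ _ _ _).mp h |>.2)]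

-- A's inner 0/1-accumulating loop is a countP (decide-form bridge)
theorem foldl_count_if' (p : String → Prop) [DecidablePred p] (l : List String) :
    l.foldl (fun acc x => if p x then acc + 1 else acc) (0 : Int)
      = ((List.countP (fun x => decide (p x)) l : Nat) : Int) := by
  have h := PySem.List.foldl_if_add_one (fun x => decide (p x)) l (0 : Int)
  simpa using h

-- ===== VERDICT (by name: the statement is the Claim_ definition above) =====
-- the per-id value of A's query loop equals B's per-id scan, for an abstract pair list
theorem per_id (k : Int) (id : String) (L : List (String × String)) :
    ((L.foldl (fun (st : PySem.Dict String (PySem.Set String) × PySem.Dict String Int) p =>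
        (st.1.modify p.1 PySem.Set.empty fun s => s.add p.2,
         st.2.modify p.2 0 fun c => c + 1))
        (PySem.Dict.empty, PySem.Dict.empty)).1.getD id PySem.Set.empty).foldl
      (fun result u =>
        if k ≤ (L.foldl (fun (st : PySem.Dict String (PySem.Set String) × PySem.Dict String Int) p =>
            (st.1.modify p.1 PySem.Set.empty fun s => s.add p.2,
             st.2.modify p.2 0 fun c => c + 1))
            (PySem.Dict.empty, PySem.Dict.empty)).2.getD u 0
        then result + 1 else result) 0
  = (PySem.Set.ofList L).foldl (fun (s : Int) p =>
      if p.1 == id && decide (k ≤ ((L.map Prod.snd).count p.2 : Int))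
      then s + 1 else s) 0 := by
  have hA := PySem.List.foldl_prod_mk
    (fun (d : PySem.Dict String (PySem.Set String)) (p : String × String) =>
      d.modify p.1 PySem.Set.empty (fun s => s.add p.2))
    (fun (d : PySem.Dict String Int) (p : String × String) =>
      d.modify p.2 0 (fun c => c + 1)) L PySem.Dict.empty PySem.Dict.empty
  simp only [hA]
  -- A's user[id] is the deduped target list of id
  rw [userA_getD, PySem.Dict.getD_empty]
  have hOfT : List.foldl PySem.Set.add PySem.Set.empty (targets id L)
      = PySem.Set.ofList (targets id L) := rfl
  rw [hOfT]
  -- A's report_count lookup is a plain count over the target multiset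
  have hrc : ∀ u, (L.foldl (fun d p => PySem.Dict.modify d p.2 0 (fun c => c + 1))
      (PySem.Dict.empty : PySem.Dict String Int)).getD u 0
      = ((L.map Prod.snd).count u : Int) := by
    intro u
    have h1 : (L.map Prod.snd).foldl (fun d x => PySem.Dict.modify d x 0 (fun c => c + 1))
        (PySem.Dict.empty : PySem.Dict String Int)
        = L.foldl (fun d p => PySem.Dict.modify d p.2 0 (fun c => c + 1))
        (PySem.Dict.empty : PySem.Dict String Int) := List.foldl_map
    rw [← h1, PySem.Dict.getD_foldl_modify_add_one, PySem.Dict.getD_empty, zero_add]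
  simp only [hrc]
  rw [foldl_count_if']
  -- B's per-id scan is a countP over the deduped pairs
  have hB := PySem.List.foldl_if_add_one
    (fun (p : String × String) => p.1 == id && decide (k ≤ ((L.map Prod.snd).count p.2 : Int)))
    (PySem.Set.ofList L) (0 : Int)
  rw [hB, zero_add]
  exact_mod_cast countP_dedup_fiber L id
    (fun u => decide (k ≤ ((L.map Prod.snd).count u : Int)))

theorem solution_spec : Claim_equal_solution := by
  intro id_list report k _ _
  unfold Spec_solution solution solution_alt
  simp only [foldl_stepA, foldl_dedup_eq_ofList, PySem.List.foldl_append_singleton_eq_map,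
    List.nil_append]
  apply List.map_congr_left
  intro id _
  exact per_id k id ((PySem.Set.ofList report).filterMap parse?)
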